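-- pv_equiv track=rewrite | github.com/xiabiqing/NotifySync | windows/notify_server_tray.py | choose_recommended_ip
-- ===== SOURCE A (Python) =====
-- def choose_recommended_ip(ips):
--     """推荐优先级：10.x.x.x > 192.168.x.x > 172.16-31.x.x > 其他"""
--     if not ips:
--         return None
--
--     preferred_prefixes = [
--         '10.', '192.168.',
--         '172.16.', '172.17.', '172.18.', '172.19.',
--         '172.20.', '172.21.', '172.22.', '172.23.',
--         '172.24.', '172.25.', '172.26.', '172.27.',
--         '172.28.', '172.29.', '172.30.', '172.31.'
--     ]
--
--     for prefix in preferred_prefixes: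
--         for ip in ips:
--             if ip.startswith(prefix):
--                 return ip
--     return ips[0]
-- ===== SOURCE B (Python) =====
-- def choose_recommended_ip(ips):
--     if not ips:
--         return None
--
--     preferred_prefixes = [
--         '10.', '192.168.',
--         '172.16.', '172.17.', '172.18.', '172.19.',
--         '172.20.', '172.21.', '172.22.', '172.23.',
--         '172.24.', '172.25.', '172.26.', '172.27.',
--         '172.28.', '172.29.', '172.30.', '172.31.'
--     ]
--
--     def priority(ip):
--         for i, prefix in enumerate(preferred_prefixes):
--             if ip.startswith(prefix):
--                 return i
--         return len(preferred_prefixes)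
--
--     best = ips[0]
--     best_p = priority(best)
--     for ip in ips[1:]:
--         p = priority(ip)
--         if p < best_p:
--             best = ip
--             best_p = p
--     return best
-- ===== Notes on version B (the rewrite author's own statement) =====
-- stated objective: simpler
-- what changed: Replaces the prefix-major nested scan with early return by a priority function (index of the first matching prefix, sentinel = number of prefixes) and one stable min pass over the ips; the no-match fallback to ips[0] falls out of the sentinel.
import Mathlib
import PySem

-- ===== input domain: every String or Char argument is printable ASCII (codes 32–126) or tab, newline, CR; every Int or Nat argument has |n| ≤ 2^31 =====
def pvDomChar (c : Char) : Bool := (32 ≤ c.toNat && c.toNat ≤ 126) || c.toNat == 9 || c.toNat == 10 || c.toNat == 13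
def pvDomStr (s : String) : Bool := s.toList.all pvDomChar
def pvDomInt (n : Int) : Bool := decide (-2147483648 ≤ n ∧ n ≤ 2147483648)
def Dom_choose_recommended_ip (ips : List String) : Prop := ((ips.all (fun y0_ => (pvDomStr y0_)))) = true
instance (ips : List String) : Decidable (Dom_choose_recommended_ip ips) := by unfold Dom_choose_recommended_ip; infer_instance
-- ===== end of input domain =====

-- B replaces A's prefix-major nested scan (early return) by a priority key (index of the first
-- matching prefix, sentinel = number of prefixes) and one stable min pass over ips; objective: simpler.

def pvPrefixes : List String :=
  ["10.", "192.168.",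
   "172.16.", "172.17.", "172.18.", "172.19.",
   "172.20.", "172.21.", "172.22.", "172.23.",
   "172.24.", "172.25.", "172.26.", "172.27.",
   "172.28.", "172.29.", "172.30.", "172.31."]

-- ===== PORT A =====
-- inner loop: 'for ip in ips: if ip.startswith(prefix): return ip'
def pvFindPref (p : String) : List String → Option String
  | [] => none
  | ip :: rest => if PySem.Str.startswith ip p then some ip else pvFindPref p rest

-- outer loop: 'for prefix in preferred_prefixes: …' with early return
def pvLoopA (ips : List String) : List String → Option String
  | [] => none
  | p :: ps =>
    match pvFindPref p ips with
    | some ip => some ip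
    | none => pvLoopA ips ps

def choose_recommended_ip (ips : List String) : Option String :=
  match ips with
  | [] => none
  | x :: _ =>
    match pvLoopA ips pvPrefixes with
    | some ip => some ip
    | none => some x      -- 'return ips[0]' (list known nonempty here)

-- ===== PORT B =====
-- 'def priority(ip): for i, prefix in enumerate(...): if ip.startswith(prefix): return i; return len(...)'
def pvPriority (ps : List String) (ip : String) : Nat :=
  match ps with
  | [] => 0
  | p :: rest => if PySem.Str.startswith ip p then 0 else 1 + pvPriority rest ip

-- the explicit stable-min loop of Source B
def pvMinFold (k : String → Nat) (best : String) : List String → String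
  | [] => best
  | ip :: rest => pvMinFold k (if k ip < k best then ip else best) rest

def choose_recommended_ip_alt (ips : List String) : Option String :=
  match ips with
  | [] => none
  | x :: rest => some (pvMinFold (pvPriority pvPrefixes) x rest)

-- ===== PRECONDITION & SPEC =====
def Spec_choose_recommended_ip (ips : List String) (out : Option String) : Prop := out = choose_recommended_ip_alt ips
instance (ips : List String) (out : Option String) : Decidable (Spec_choose_recommended_ip ips out) := by unfold Spec_choose_recommended_ip; infer_instance

-- ===== CLAIM (what is proved, stated in full; the proofs are below) =====
def Claim_equal_choose_recommended_ip : Prop := ∀ (ips : List String), Dom_choose_recommended_ip ips → Spec_choose_recommended_ip ips (choose_recommended_ip ips)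

-- ===== LEMMAS AND PROOFS =====

-- if the start already has minimal key, the stable min loop keeps it
theorem pvMinFold_const (k : String → Nat) (x : String) (ips : List String)
    (h : ∀ y ∈ ips, k x ≤ k y) : pvMinFold k x ips = x := by
  induction ips with
  | nil => rfl
  | cons y ys ih =>
    have hy : ¬ k y < k x := not_lt.mpr (h y (by simp))
    simp [pvMinFold, hy]
    exact ih (fun z hz => h z (by simp [hz]))

-- the stable min loop returns the first element of key 0, when one exists and the start has nonzero key
theorem pvMinFold_firstZero (k : String → Nat) (p : String)
    (hk : ∀ z, k z = 0 ↔ PySem.Str.startswith z p = true) :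
    ∀ (ips : List String) (x ip : String), k x ≠ 0 → pvFindPref p ips = some ip →
      pvMinFold k x ips = ip := by
  intro ips
  induction ips with
  | nil => intro x ip _ h; simp [pvFindPref] at h
  | cons y ys ih =>
    intro x ip hx hf
    by_cases hy : PySem.Str.startswith y p = true
    · have hy0 : k y = 0 := (hk y).mpr hy
      have hip : ip = y := by
        simp only [pvFindPref, if_pos hy] at hf
        exact (Option.some.inj hf.symm)
      subst hip
      have hlt : k ip < k x := by omega
      simp only [pvMinFold, if_pos hlt]
      exact pvMinFold_const k ip ys (fun z _ => by omega)
    · have hy0 : k y ≠ 0 := fun h => hy ((hk y).mp h)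
      have hf' : pvFindPref p ys = some ip := by
        simpa only [pvFindPref, if_neg hy] using hf
      simp only [pvMinFold]
      split
      · exact ih y ip hy0 hf'
      · exact ih x ip hx hf'

-- shifting every key by +1 on the relevant elements does not change the stable min loop
theorem pvMinFold_shift (k k' : String → Nat) (S : List String)
    (h : ∀ a ∈ S, k' a = 1 + k a) :
    ∀ (ips : List String) (x : String), x ∈ S → (∀ y ∈ ips, y ∈ S) →
      pvMinFold k' x ips = pvMinFold k x ips := by
  intro ips
  induction ips with
  | nil => intro x _ _; rfl
  | cons y ys ih =>
    intro x hx hys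
    have hyS : y ∈ S := hys y (by simp)
    have hcond : (k' y < k' x) = (k y < k x) := by
      rw [h y hyS, h x hx]; simp
    simp only [pvMinFold, hcond]
    split
    · exact ih y hyS (fun z hz => hys z (by simp [hz]))
    · exact ih x hx (fun z hz => hys z (by simp [hz]))

-- no match for p anywhere in the list
theorem pvFindPref_none (p : String) :
    ∀ (l : List String), pvFindPref p l = none → ∀ z ∈ l, PySem.Str.startswith z p ≠ true := by
  intro l
  induction l with
  | nil => intro _ z hz; simp at hz
  | cons y ys ih =>
    intro h z hz
    by_cases hy : PySem.Str.startswith y p = true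
    · simp only [pvFindPref, if_pos hy] at h
      exact absurd h (by simp)
    · have h' : pvFindPref p ys = none := by
        simpa only [pvFindPref, if_neg hy] using h
      rcases List.mem_cons.mp hz with rfl | hz'
      · exact fun hc => hy hc
      · exact ih h' z hz'

-- the core: A's nested scan over any prefix list = B's stable min pass keyed by pvPriority
theorem pv_core : ∀ (ps : List String) (x : String) (rest : List String),
    (match pvLoopA (x :: rest) ps with
     | some ip => ip
     | none => x) = pvMinFold (pvPriority ps) x rest := by
  intro ps
  induction ps with
  | nil =>
    intro x rest
    simp only [pvLoopA]
    exact (pvMinFold_const _ x rest (fun y _ => le_refl 0)).symm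
  | cons p ps ih =>
    intro x rest
    have hk : ∀ z, pvPriority (p :: ps) z = 0 ↔ PySem.Str.startswith z p = true := by
      intro z
      by_cases hz : PySem.Str.startswith z p = true <;> simp [pvPriority, hz]
    cases hf : pvFindPref p (x :: rest) with
    | some ip =>
      simp only [pvLoopA, hf]
      by_cases hx : PySem.Str.startswith x p = true
      · have hip : ip = x := by
          simp only [pvFindPref, if_pos hx] at hf
          exact (Option.some.inj hf.symm)
        subst hip
        have hx0 : pvPriority (p :: ps) ip = 0 := (hk ip).mpr hx
        exact (pvMinFold_const _ ip rest (fun y _ => by omega)).symm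
      · have hx0 : pvPriority (p :: ps) x ≠ 0 := fun h => hx ((hk x).mp h)
        have hf' : pvFindPref p rest = some ip := by
          simpa only [pvFindPref, if_neg hx] using hf
        exact (pvMinFold_firstZero _ p hk rest x ip hx0 hf').symm
    | none =>
      have hnone := pvFindPref_none p (x :: rest) hf
      have hshift : ∀ a ∈ (x :: rest), pvPriority (p :: ps) a = 1 + pvPriority ps a := by
        intro a ha
        have hfa : PySem.Str.startswith a p ≠ true := hnone a ha
        simp only [pvPriority, if_neg hfa]
      simp only [pvLoopA, hf]
      rw [pvMinFold_shift (pvPriority ps) (pvPriority (p :: ps)) (x :: rest) hshift rest x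
            (by simp) (fun y hy => by simp [hy])]
      exact ih x rest

-- ===== VERDICT (by name: the statement is the Claim_ definition above) =====
theorem choose_recommended_ip_spec : Claim_equal_choose_recommended_ip := by
  intro ips _
  unfold Spec_choose_recommended_ip choose_recommended_ip choose_recommended_ip_alt
  cases ips with
  | nil => rfl
  | cons x rest =>
    have h := pv_core pvPrefixes x rest
    cases hl : pvLoopA (x :: rest) pvPrefixes with
    | some ip => simp only [hl] at h ⊢; rw [h]
    | none => simp only [hl] at h; exact congrArg some h
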